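-- pv_equiv track=rewrite | github.com/viniciussouzas/project-pro-filer | pro_filer/actions/alpha_actions.py | _classify_files_by_name
-- ===== SOURCE A (Python) =====
-- def _classify_files_by_name(context):
--     classified_files = {}
--
--     for path in context["all_files"]:
--         extension = path.split(".")[-1]
--         extension_length = len(extension)
--         file_name = path.split("/")[-1][: -extension_length - 1]
--
--         if file_name not in classified_files:
--             classified_files[file_name] = []
--
--         classified_files[file_name].append(path)
--
--     return classified_files
-- ===== SOURCE B (Python) =====
-- def _classify_files_by_name(context):
--     paths = context["all_files"]
--
--     def key(path):
--         extension = path.split(".")[-1]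
--         return path.split("/")[-1][: -len(extension) - 1]
--
--     names = list(dict.fromkeys(key(p) for p in paths))
--     return {name: [p for p in paths if key(p) == name] for name in names}
-- ===== Notes on version B (the rewrite author's own statement) =====
-- stated objective: alternative
-- what changed: Replaces the single insertion-order dict-building pass with a two-phase strategy: first compute the ordered distinct base names (dict.fromkeys), then build each group by filtering the path list per name in a dict comprehension.
import Mathlib
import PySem

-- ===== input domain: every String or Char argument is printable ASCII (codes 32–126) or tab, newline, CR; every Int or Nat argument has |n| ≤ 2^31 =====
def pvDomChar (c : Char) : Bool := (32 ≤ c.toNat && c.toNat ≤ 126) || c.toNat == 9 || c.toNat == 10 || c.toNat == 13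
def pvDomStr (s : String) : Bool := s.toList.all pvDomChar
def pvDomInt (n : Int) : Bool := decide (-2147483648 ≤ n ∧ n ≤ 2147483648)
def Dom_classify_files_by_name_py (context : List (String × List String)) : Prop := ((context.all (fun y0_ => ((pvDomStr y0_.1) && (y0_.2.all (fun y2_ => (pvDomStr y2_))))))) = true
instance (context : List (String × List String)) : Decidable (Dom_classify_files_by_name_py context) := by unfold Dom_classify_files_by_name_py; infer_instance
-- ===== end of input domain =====

-- B groups by first computing the ordered distinct base names and then filtering the path
-- list once per name, instead of A's single dict-building pass (objective: alternative).

-- ===== PORT A =====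
def classify_files_by_name_py (context : List (String × List String)) : List (String × List String) :=
  let all_files := (context.lookup "all_files").getD []       -- context["all_files"]; KeyError excluded by Pre_
  let classified_files : PySem.Dict String (List String) :=
    all_files.foldl (fun classified_files path =>
      let extension := PySem.List.pyGetD ((PySem.Str.split? path ".").getD []) (-1) ""
      let extension_length := PySem.Str.len extension
      let file_name := PySem.Str.slice (PySem.List.pyGetD ((PySem.Str.split? path "/").getD []) (-1) "") none (some (-extension_length - 1))
      let cf := if classified_files.contains file_name = false then classified_files.insert file_name [] else classified_files
      cf.insert file_name (cf.getD file_name [] ++ [path])) PySem.Dict.empty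
  classified_files.items

-- ===== PORT B =====
def pvKeyB (path : String) : String :=
  let extension := PySem.List.pyGetD ((PySem.Str.split? path ".").getD []) (-1) ""
  PySem.Str.slice (PySem.List.pyGetD ((PySem.Str.split? path "/").getD []) (-1) "") none (some (-(PySem.Str.len extension) - 1))

def classify_files_by_name_py_alt (context : List (String × List String)) : List (String × List String) :=
  let paths := (context.lookup "all_files").getD []           -- context["all_files"]; KeyError excluded by Pre_
  let names := PySem.Set.ofList (paths.map pvKeyB)            -- list(dict.fromkeys(...))
  names.map (fun name => (name, paths.filter (fun p => pvKeyB p == name)))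

-- ===== PRECONDITION & SPEC =====
-- Pre_ excludes exactly the inputs where Python A raises KeyError ("all_files" not a key).
def Pre_classify_files_by_name_py (context : List (String × List String)) : Prop :=
  "all_files" ∈ context.map Prod.fst
instance (context : List (String × List String)) : Decidable (Pre_classify_files_by_name_py context) := by unfold Pre_classify_files_by_name_py; infer_instance

def pvWitness_classify_files_by_name_py : (List (String × List String)) :=
  [("all_files", ["a.txt", "b/a.txt", "noext"])]

def Spec_classify_files_by_name_py (context : List (String × List String)) (out : List (String × List String)) : Prop := out = classify_files_by_name_py_alt context
instance (context : List (String × List String)) (out : List (String × List String)) : Decidable (Spec_classify_files_by_name_py context out) := by unfold Spec_classify_files_by_name_py; infer_instance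

-- ===== CLAIM (what is proved, stated in full; the proofs are below) =====
def Claim_equal_classify_files_by_name_py : Prop := ∀ (context : List (String × List String)), Dom_classify_files_by_name_py context → Pre_classify_files_by_name_py context → Spec_classify_files_by_name_py context (classify_files_by_name_py context)

-- ===== LEMMAS AND PROOFS =====

-- A's loop body ('if missing: d[k]=[]' then append) is exactly Dict.modify with default [].
lemma stepA_eq_modify (d : PySem.Dict String (List String)) (k path : String) :
    (let cf := if d.contains k = false then d.insert k [] else d
     cf.insert k (cf.getD k [] ++ [path])) = d.modify k [] (· ++ [path]) := by
  by_cases hc : d.contains k = true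
  · simp [hc, PySem.Dict.modify]
  · simp only [PySem.Dict.modify]
    rw [if_pos (by simp [hc])]
    rw [PySem.Dict.insert_insert_self, PySem.Dict.getD_insert_self,
        PySem.Dict.getD_of_not_contains d [] (by simpa using hc)]

lemma foldA_eq_modify_fold (fs : List String) (d : PySem.Dict String (List String)) :
    fs.foldl (fun classified_files path =>
      let extension := PySem.List.pyGetD ((PySem.Str.split? path ".").getD []) (-1) ""
      let extension_length := PySem.Str.len extension
      let file_name := PySem.Str.slice (PySem.List.pyGetD ((PySem.Str.split? path "/").getD []) (-1) "") none (some (-extension_length - 1))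
      let cf := if classified_files.contains file_name = false then classified_files.insert file_name [] else classified_files
      cf.insert file_name (cf.getD file_name [] ++ [path])) d
    = (fs.map (fun p => (pvKeyB p, p))).foldl (fun d q => d.modify q.1 [] (fun x => x ++ [q.2])) d := by
  induction fs generalizing d with
  | nil => rfl
  | cons p ps ih =>
      simp only [List.foldl_cons, List.map_cons]
      rw [← ih]
      congr 1
      exact stepA_eq_modify d (pvKeyB p) p

lemma filter_map_pairs (fs : List String) (n : String) :
    ((fs.map (fun p => (pvKeyB p, p))).filter (fun q => q.1 == n)).map (fun q => q.2)
      = fs.filter (fun p => pvKeyB p == n) := by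
  induction fs with
  | nil => rfl
  | cons p ps ih =>
      by_cases h : pvKeyB p == n
      · simp [h, ih]
      · simp [h, ih]

lemma set_update_nil (l : List String) : PySem.Set.update ([] : List String) l = PySem.Set.ofList l := by
  rfl

theorem classify_main (context : List (String × List String)) :
    classify_files_by_name_py context = classify_files_by_name_py_alt context := by
  unfold classify_files_by_name_py classify_files_by_name_py_alt
  simp only []
  set fs := (context.lookup "all_files").getD [] with hfs
  rw [foldA_eq_modify_fold]
  set l := fs.map (fun p => (pvKeyB p, p)) with hl
  set d := l.foldl (fun d q => d.modify q.1 [] (fun x => x ++ [q.2])) PySem.Dict.empty with hd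
  have hnodup : d.keys.Nodup := by
    rw [hd]
    exact PySem.Dict.nodup_keys_foldl_modify_key l Prod.fst [] (fun d q _ => d.getD q.1 [] ++ [q.2]) PySem.Dict.empty (by simp)
  have hkeys : d.keys = PySem.Set.ofList (fs.map pvKeyB) := by
    rw [hd]
    have := PySem.Dict.keys_foldl_modify_key l Prod.fst [] (fun d q _ => d.getD q.1 [] ++ [q.2]) PySem.Dict.empty
    simp only [PySem.Dict.modify] at this ⊢
    rw [this]
    simp [hl, set_update_nil, List.map_map, Function.comp_def]
  have hget : ∀ n, d.getD n [] = fs.filter (fun p => pvKeyB p == n) := by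
    intro n
    rw [hd, PySem.Dict.getD_foldl_modify_append l PySem.Dict.empty n]
    simp [hl, filter_map_pairs]
  rw [PySem.Dict.items_eq_map_keys d hnodup [], hkeys]
  exact List.map_congr_left (fun n _ => by rw [hget n])

-- ===== VERDICT (by name: the statement is the Claim_ definition above) =====
theorem classify_files_by_name_py_spec : Claim_equal_classify_files_by_name_py := by
  intro context _ _
  unfold Spec_classify_files_by_name_py
  exact classify_main context
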